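-- pv_equiv track=rewrite | github.com/minhalansari/Project9_python | proj06.py | get_user_names
-- ===== SOURCE A (Python) =====
-- def get_user_names(L):
--     '''takes data and returns an alphabetical list of
--     the names that appear in the data'''
--     namelist = [] #initialize list
--     #for loop going through each line in the data
--     for l in L:
--         name = l[0]   #separate username
--         #add name to namelist if not already there
--         if name not in namelist:
--             namelist.append(name)
--     sortednamelist = sorted(namelist) #sort name list alphabetically
--     return sortednamelist
-- ===== SOURCE B (Python) =====
-- def get_user_names(L):
--     '''sort all first-column names first, then drop adjacent duplicates in one pass'''
--     names = sorted(l[0] for l in L)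
--     result = []
--     for name in names:
--         if not result or result[-1] != name:
--             result.append(name)
--     return result
-- ===== Notes on version B (the rewrite author's own statement) =====
-- stated objective: alternative
-- what changed: B sorts the full first-column list first and removes adjacent duplicates in one linear pass, instead of A's membership-scan dedup of an unsorted list followed by a sort.
import Mathlib
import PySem

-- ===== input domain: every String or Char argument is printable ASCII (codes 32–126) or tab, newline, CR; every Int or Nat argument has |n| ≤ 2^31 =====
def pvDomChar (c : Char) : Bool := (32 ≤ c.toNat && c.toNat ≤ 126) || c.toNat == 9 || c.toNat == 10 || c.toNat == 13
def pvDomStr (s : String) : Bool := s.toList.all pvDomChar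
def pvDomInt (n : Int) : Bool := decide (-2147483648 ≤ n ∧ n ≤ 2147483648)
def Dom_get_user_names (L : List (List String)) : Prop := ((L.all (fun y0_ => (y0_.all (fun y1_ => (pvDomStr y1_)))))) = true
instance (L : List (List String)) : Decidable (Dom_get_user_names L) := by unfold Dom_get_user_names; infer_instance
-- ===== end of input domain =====

-- B sorts the full first-column list first, then drops adjacent duplicates in one linear pass,
-- instead of A's membership-scan dedup of an unsorted list followed by a sort (alternative algorithm).

-- ===== PORT A =====
-- l[0] is ported with pyGet?; Pre_ excludes empty rows, where Python's l[0] raises IndexError.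
def get_user_names (L : List (List String)) : List String :=
  let namelist := L.foldl (fun namelist l =>
    let name := (PySem.List.pyGet? l 0).getD ""
    if name ∈ namelist then namelist else namelist ++ [name]) []
  PySem.List.sorted namelist (fun x => x) false

-- ===== PORT B =====
def get_user_names_alt (L : List (List String)) : List String :=
  let names := PySem.List.sorted (L.map (fun l => (PySem.List.pyGet? l 0).getD "")) (fun x => x) false
  names.foldl (fun result name =>
    if result = [] then result ++ [name]
    else if result.getLast? ≠ some name then result ++ [name]
    else result) []

-- ===== PRECONDITION & SPEC =====
-- Pre_ excludes rows that are empty lists: on those Python's l[0] raises IndexError in both A and B.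
def Pre_get_user_names (L : List (List String)) : Prop := ∀ l ∈ L, l ≠ []
instance (L : List (List String)) : Decidable (Pre_get_user_names L) := by unfold Pre_get_user_names; infer_instance
def pvWitness_get_user_names : List (List String) := [["bob", "3"], ["al"], ["bob", "x"]]
def Spec_get_user_names (L : List (List String)) (out : List String) : Prop := out = get_user_names_alt L
instance (L : List (List String)) (out : List String) : Decidable (Spec_get_user_names L out) := by unfold Spec_get_user_names; infer_instance

-- ===== CLAIM (what is proved, stated in full; the proofs are below) =====
def Claim_equal_get_user_names : Prop := ∀ (L : List (List String)), Dom_get_user_names L → Pre_get_user_names L → Spec_get_user_names L (get_user_names L)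

-- ===== LEMMAS AND PROOFS =====

-- adjacent-dedup of a list, recursively: go prev skips elements equal to prev
def pvGo (p : String) : List String → List String
  | [] => []
  | x :: xs => if x = p then pvGo p xs else x :: pvGo x xs

-- B's foldl loop equals pvGo once the accumulator ends in p
theorem pvFoldl_go (xs : List String) : ∀ (acc : List String) (p : String),
    acc.getLast? = some p →
    xs.foldl (fun result name =>
      if result = [] then result ++ [name]
      else if result.getLast? ≠ some name then result ++ [name]
      else result) acc = acc ++ pvGo p xs := by
  induction xs with
  | nil => intro acc p _; simp [pvGo]
  | cons x xs ih =>
    intro acc p hlast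
    have hne : acc ≠ [] := by intro h; simp [h] at hlast
    by_cases hxp : x = p
    · subst hxp
      have hstep : (if acc = [] then acc ++ [x]
        else if acc.getLast? ≠ some x then acc ++ [x] else acc) = acc := by
        rw [if_neg hne, hlast]; simp
      simp only [List.foldl_cons, hstep]
      rw [ih acc x hlast]
      simp [pvGo]
    · have hstep : (if acc = [] then acc ++ [x]
        else if acc.getLast? ≠ some x then acc ++ [x] else acc) = acc ++ [x] := by
        rw [if_neg hne, if_pos]
        rw [hlast]; simp; exact fun h => hxp h.symm
      simp only [List.foldl_cons, hstep]
      rw [ih (acc ++ [x]) x (by simp)]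
      simp [pvGo, hxp]

-- pvGo on a sorted tail with a strict lower bound p: strictly increasing, membership = tail minus p
theorem pvGo_spec (xs : List String) : ∀ (p : String),
    xs.Pairwise (· ≤ ·) → (∀ y ∈ xs, p ≤ y) →
    (p :: pvGo p xs).Pairwise (· < ·) ∧ (∀ z, z ∈ p :: pvGo p xs ↔ z = p ∨ z ∈ xs) := by
  induction xs with
  | nil => intro p _ _; constructor <;> simp [pvGo]
  | cons x xs ih =>
    intro p hpw hlb
    have hx : p ≤ x := hlb x (by simp)
    have hxs : xs.Pairwise (· ≤ ·) := hpw.of_cons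
    have hxlb : ∀ y ∈ xs, x ≤ y := by
      intro y hy; exact List.rel_of_pairwise_cons hpw hy
    by_cases hxp : x = p
    · subst hxp
      obtain ⟨h1, h2⟩ := ih x hxs hxlb
      have hgo : pvGo x (x :: xs) = pvGo x xs := by simp [pvGo]
      rw [hgo]
      refine ⟨h1, ?_⟩
      intro z
      rw [h2 z]
      simp only [List.mem_cons]
      tauto
    · obtain ⟨h1, h2⟩ := ih x hxs hxlb
      have hplt : p < x := lt_of_le_of_ne hx (fun h => hxp h.symm)
      have hgo : pvGo p (x :: xs) = x :: pvGo x xs := by simp [pvGo, hxp]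
      rw [hgo]
      constructor
      · refine List.Pairwise.cons ?_ h1
        intro z hz
        rcases (h2 z).mp hz with h | h
        · exact h ▸ hplt
        · exact lt_of_lt_of_le hplt (hxlb z h)
      · intro z
        have := h2 z
        simp only [List.mem_cons] at this ⊢
        tauto

-- A's accumulator loop: nodup and membership invariant
theorem pvA_inv (L : List (List String)) : ∀ (acc : List String), acc.Nodup →
    (L.foldl (fun namelist l =>
      let name := (PySem.List.pyGet? l 0).getD ""
      if name ∈ namelist then namelist else namelist ++ [name]) acc).Nodup ∧
    (∀ z, z ∈ L.foldl (fun namelist l =>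
      let name := (PySem.List.pyGet? l 0).getD ""
      if name ∈ namelist then namelist else namelist ++ [name]) acc ↔
      z ∈ acc ∨ z ∈ L.map (fun l => (PySem.List.pyGet? l 0).getD "")) := by
  induction L with
  | nil => intro acc h; exact ⟨h, by simp⟩
  | cons l L ih =>
    intro acc hacc
    simp only [List.foldl_cons]
    set n := (PySem.List.pyGet? l 0).getD "" with hn
    by_cases hmem : n ∈ acc
    · simp only [if_pos hmem]
      obtain ⟨h1, h2⟩ := ih acc hacc
      refine ⟨h1, fun z => ?_⟩
      rw [h2 z]
      simp only [List.map_cons, List.mem_cons]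
      constructor
      · tauto
      · rintro (h | h | h)
        · exact Or.inl h
        · exact Or.inl (h ▸ hmem)
        · exact Or.inr h
    · simp only [if_neg hmem]
      have hnd : (acc ++ [n]).Nodup := by
        simp only [List.nodup_append, List.nodup_cons, List.not_mem_nil, not_false_iff,
          List.nodup_nil, and_true, true_and]
        refine ⟨hacc, fun a ha => by simp; exact fun h => hmem (h ▸ ha)⟩
      obtain ⟨h1, h2⟩ := ih (acc ++ [n]) hnd
      refine ⟨h1, fun z => ?_⟩
      rw [h2 z]
      simp only [List.mem_append, List.map_cons, List.mem_cons]
      tauto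

-- ===== VERDICT (by name: the statement is the Claim_ definition above) =====
theorem get_user_names_spec : Claim_equal_get_user_names := by
  intro L _ _
  show PySem.List.sorted
      (L.foldl (fun namelist l =>
        let name := (PySem.List.pyGet? l 0).getD ""
        if name ∈ namelist then namelist else namelist ++ [name]) [])
      (fun x => x) false
    = (PySem.List.sorted (L.map (fun l => (PySem.List.pyGet? l 0).getD "")) (fun x => x) false).foldl
        (fun result name => if result = [] then result ++ [name]
          else if result.getLast? ≠ some name then result ++ [name] else result) []
  obtain ⟨hAnd, hAmem⟩ := pvA_inv L [] List.nodup_nil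
  have hpw : (PySem.List.sorted (L.map (fun l => (PySem.List.pyGet? l 0).getD "")) (fun x => x) false).Pairwise (· ≤ ·) :=
    PySem.List.sorted_pairwise _ _
  cases hB : PySem.List.sorted (L.map (fun l => (PySem.List.pyGet? l 0).getD "")) (fun x => x) false with
  | nil =>
    have hh : L.map (fun l => (PySem.List.pyGet? l 0).getD "") = [] := by
      rw [PySem.List.sorted_eq_nil_iff] at hB; exact hB
    have hAempty : L.foldl (fun namelist l =>
        let name := (PySem.List.pyGet? l 0).getD ""
        if name ∈ namelist then namelist else namelist ++ [name]) [] = [] := by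
      rw [List.eq_nil_iff_forall_not_mem]
      intro a ha
      rcases (hAmem a).mp ha with h | h
      · simp at h
      · rw [hh] at h; simp at h
    rw [hAempty]
    rfl
  | cons m t =>
    rw [hB] at hpw
    have hm_lb : ∀ y ∈ t, m ≤ y := fun y hy => List.rel_of_pairwise_cons hpw hy
    obtain ⟨hgpw, hgmem⟩ := pvGo_spec t m hpw.of_cons hm_lb
    have hfold := pvFoldl_go t [m] m (by simp)
    have hBval : (m :: t).foldl (fun result name =>
        if result = [] then result ++ [name]
        else if result.getLast? ≠ some name then result ++ [name] else result) [] = m :: pvGo m t := by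
      simp only [List.foldl_cons, List.nil_append]
      exact hfold
    rw [hBval]
    have hmemAll : ∀ z, z ∈ (m :: pvGo m t) ↔ z ∈ L.foldl (fun namelist l =>
        let name := (PySem.List.pyGet? l 0).getD ""
        if name ∈ namelist then namelist else namelist ++ [name]) [] := by
      intro z
      rw [hgmem z, hAmem z]
      have hsm : z ∈ PySem.List.sorted (L.map (fun l => (PySem.List.pyGet? l 0).getD "")) (fun x => x) false
          ↔ z ∈ L.map (fun l => (PySem.List.pyGet? l 0).getD "") := PySem.List.mem_sorted _ _ _ _
      rw [hB] at hsm
      simp only [List.mem_cons] at hsm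
      simp only [List.not_mem_nil, false_or]
      exact Iff.trans (by tauto) hsm
    have hndg : (m :: pvGo m t).Nodup := hgpw.imp (fun {a b} h => ne_of_lt h)
    have hperm : (m :: pvGo m t).Perm (L.foldl (fun namelist l =>
        let name := (PySem.List.pyGet? l 0).getD ""
        if name ∈ namelist then namelist else namelist ++ [name]) []) :=
      (List.perm_ext_iff_of_nodup hndg hAnd).mpr hmemAll
    exact PySem.List.sorted_eq_of_perm_of_pairwise_lt _ _ _ hperm hgpw
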